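-- pv_equiv track=rewrite | github.com/Nghia03092004/nghia03092004.github.io | project_euler/problem_403/solution.py | sum_P_linear
-- ===== SOURCE A (Python) =====
-- from math import comb
--
-- def sum_pow(a, b, k):
--     """Exact sum of v^k for v = a, a+1, ..., b."""
--     if a > b:
--         return 0
--
--     def prefix(n):
--         if n < 0:
--             return 0
--         if k == 0:
--             return n + 1
--         elif k == 1:
--             return n * (n + 1) // 2
--         elif k == 2:
--             return n * (n + 1) * (2 * n + 1) // 6
--         elif k == 3:
--             t = n * (n + 1) // 2
--             return t * t
--         elif k == 4:
--             return n * (n + 1) * (2 * n + 1) * (3 * n * n + 3 * n - 1) // 30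
--
--     return prefix(b) - prefix(a - 1)
--
-- def sum_P_linear(v1, v2, coeff, offset):
--     """Compute sum_{v=v1}^{v2} P(coeff*v + offset) exactly.
--
--     P(w) = (w^4 + 2w^3 + 11w^2 + 34w + 24) / 24.
--     Substituting w = coeff*v + offset and expanding gives a degree-4
--     polynomial in v whose partial sums are computable in O(1).
--     """
--     if v1 > v2:
--         return 0
--     c, d = coeff, offset
--
--     def wk_coeff(k, j):
--         if j > k:
--             return 0
--         return comb(k, j) * c ** j * d ** (k - j)
--
--     total = 0
--     for j in range(5):
--         cj = (wk_coeff(4, j) + 2 * wk_coeff(3, j) +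
--               11 * wk_coeff(2, j) + 34 * wk_coeff(1, j) +
--               24 * (1 if j == 0 else 0))
--         total += cj * sum_pow(v1, v2, j)
--
--     return total // 24
-- ===== SOURCE B (Python) =====
-- from math import comb
--
-- def sum_P_linear(v1, v2, coeff, offset):
--     if v1 > v2:
--         return 0
--     # forward-difference table of f(v) = 24*P(coeff*v + offset) from its values at v = 0..4
--     cur = [(coeff * i + offset) ** 4 + 2 * (coeff * i + offset) ** 3
--            + 11 * (coeff * i + offset) ** 2 + 34 * (coeff * i + offset) + 24
--            for i in range(5)]
--     diffs = []
--     while cur: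
--         diffs.append(cur[0])
--         cur = [cur[i + 1] - cur[i] for i in range(len(cur) - 1)]
--
--     def T(n):
--         # sum of f(v) over v = 0..n (empty for n < 0), by the hockey-stick identity
--         if n < 0:
--             return 0
--         return sum(dj * comb(n + 1, j + 1) for j, dj in enumerate(diffs))
--
--     return (T(v2) - T(v1 - 1)) // 24
-- ===== Notes on version B (the rewrite author's own statement) =====
-- stated objective: alternative
-- what changed: B drops A's symbolic binomial expansion of P(coeff*v+offset) and the hard-coded Faulhaber power-sum formulas; instead it builds a numeric Newton forward-difference table from five evaluations of the raw polynomial and sums it over each prefix range with the hockey-stick identity comb(n+1, j+1).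
import Mathlib
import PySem

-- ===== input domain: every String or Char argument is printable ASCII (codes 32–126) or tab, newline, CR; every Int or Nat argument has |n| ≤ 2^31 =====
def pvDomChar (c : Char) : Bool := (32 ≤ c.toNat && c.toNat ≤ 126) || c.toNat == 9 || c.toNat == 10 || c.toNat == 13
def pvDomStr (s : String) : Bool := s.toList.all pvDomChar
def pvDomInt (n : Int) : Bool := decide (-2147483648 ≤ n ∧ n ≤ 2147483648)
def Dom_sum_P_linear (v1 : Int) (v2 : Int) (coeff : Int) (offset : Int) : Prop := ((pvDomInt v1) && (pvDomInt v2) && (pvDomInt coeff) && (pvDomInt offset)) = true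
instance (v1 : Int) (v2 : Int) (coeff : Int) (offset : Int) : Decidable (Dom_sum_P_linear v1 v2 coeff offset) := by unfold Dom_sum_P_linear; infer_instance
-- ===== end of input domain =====

-- B replaces A's symbolic binomial expansion + Faulhaber closed-form power sums by a numeric
-- Newton forward-difference table of the raw polynomial and the hockey-stick identity (objective: alternative).

-- ===== PORT A =====
-- prefix(n) of sum_pow, with k a parameter; Python returns None implicitly for k ∉ 0..4,
-- which A never reaches (k ranges over 0..4): that unreachable branch is ported as 0.
def prefixA (k : Int) (n : Int) : Int :=
  if n < 0 then 0
  else if k == 0 then n + 1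
  else if k == 1 then PySem.Int.floordiv (n * (n + 1)) 2
  else if k == 2 then PySem.Int.floordiv (n * (n + 1) * (2 * n + 1)) 6
  else if k == 3 then
    let t := PySem.Int.floordiv (n * (n + 1)) 2
    t * t
  else if k == 4 then
    PySem.Int.floordiv (n * (n + 1) * (2 * n + 1) * (3 * n * n + 3 * n - 1)) 30
  else 0

def sum_pow (a : Int) (b : Int) (k : Int) : Int :=
  if a > b then 0 else prefixA k b - prefixA k (a - 1)

-- wk_coeff(k, j) = comb(k, j) * c**j * d**(k-j)  (j, k are always 0..4 here, so toNat is exact)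
def wkCoeff (c : Int) (d : Int) (k : Int) (j : Int) : Int :=
  if j > k then 0
  else (Nat.choose k.toNat j.toNat : Int) * c ^ j.toNat * d ^ (k - j).toNat

def sum_P_linear (v1 : Int) (v2 : Int) (coeff : Int) (offset : Int) : Int :=
  if v1 > v2 then 0
  else
    let c := coeff
    let d := offset
    let total := (PySem.List.pyRange 0 5 1).foldl
      (fun total j =>
        total + (wkCoeff c d 4 j + 2 * wkCoeff c d 3 j +
                 11 * wkCoeff c d 2 j + 34 * wkCoeff c d 1 j +
                 24 * (if j == 0 then 1 else 0)) * sum_pow v1 v2 j) 0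
    PySem.Int.floordiv total 24

-- ===== PORT B =====
-- while cur: diffs.append(cur[0]); cur = [cur[i+1]-cur[i] ...]  (structural recursion on cur)
def diffTable (cur : List Int) : List Int :=
  match cur with
  | [] => []
  | x :: rest => x :: diffTable (List.zipWith (fun a b => b - a) (x :: rest) rest)
termination_by cur.length
decreasing_by simp [List.length_zipWith]

-- T(n) = sum(dj * comb(n+1, j+1) for j, dj in enumerate(diffs)), 0 for n < 0
def altT (diffs : List Int) (n : Int) : Int :=
  if n < 0 then 0
  else ((PySem.List.enumerate diffs 0).map
    (fun p => p.2 * ((Nat.choose (n + 1).toNat (p.1.toNat + 1) : Nat) : Int))).sum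

def sum_P_linear_alt (v1 : Int) (v2 : Int) (coeff : Int) (offset : Int) : Int :=
  if v1 > v2 then 0
  else
    let diffs := diffTable ((PySem.List.pyRange 0 5 1).map (fun i =>
      (coeff * i + offset) ^ 4 + 2 * (coeff * i + offset) ^ 3 +
      11 * (coeff * i + offset) ^ 2 + 34 * (coeff * i + offset) + 24))
    PySem.Int.floordiv (altT diffs v2 - altT diffs (v1 - 1)) 24

-- ===== PRECONDITION & SPEC =====
def Spec_sum_P_linear (v1 : Int) (v2 : Int) (coeff : Int) (offset : Int) (out : Int) : Prop := out = sum_P_linear_alt v1 v2 coeff offset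
instance (v1 : Int) (v2 : Int) (coeff : Int) (offset : Int) (out : Int) : Decidable (Spec_sum_P_linear v1 v2 coeff offset out) := by unfold Spec_sum_P_linear; infer_instance

-- ===== CLAIM (what is proved, stated in full; the proofs are below) =====
def Claim_equal_sum_P_linear : Prop := ∀ (v1 : Int) (v2 : Int) (coeff : Int) (offset : Int), Dom_sum_P_linear v1 v2 coeff offset → Spec_sum_P_linear v1 v2 coeff offset (sum_P_linear v1 v2 coeff offset)

-- ===== LEMMAS AND PROOFS =====

-- exactness of the Faulhaber floor divisions (0 ≤ n)
lemma dvd2 (n : Int) : (2 : Int) ∣ n * (n + 1) := by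
  have h : ∀ x : ZMod 2, x * (x + 1) = 0 := by decide
  have := (ZMod.intCast_zmod_eq_zero_iff_dvd (n * (n + 1)) 2).mp (by push_cast; exact h n)
  exact_mod_cast this

lemma dvd6 (n : Int) : (6 : Int) ∣ n * (n + 1) * (2 * n + 1) := by
  have h : ∀ x : ZMod 6, x * (x + 1) * (2 * x + 1) = 0 := by decide
  have := (ZMod.intCast_zmod_eq_zero_iff_dvd (n * (n + 1) * (2 * n + 1)) 6).mp
    (by push_cast; exact h n)
  exact_mod_cast this

lemma dvd30 (n : Int) : (30 : Int) ∣ n * (n + 1) * (2 * n + 1) * (3 * n * n + 3 * n - 1) := by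
  have h : ∀ x : ZMod 30, x * (x + 1) * (2 * x + 1) * (3 * x * x + 3 * x - 1) = 0 := by decide
  have := (ZMod.intCast_zmod_eq_zero_iff_dvd
    (n * (n + 1) * (2 * n + 1) * (3 * n * n + 3 * n - 1)) 30).mp (by push_cast; exact h n)
  exact_mod_cast this

-- prefix sums step by (n+1)^k when 0 ≤ n
lemma prefix_step (k : Int) (n : Int) (hn : 0 ≤ n) (hk : k = 0 ∨ k = 1 ∨ k = 2 ∨ k = 3 ∨ k = 4) :
    prefixA k (n + 1) = prefixA k n + (n + 1) ^ k.toNat := by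
  have h2a := Int.mul_ediv_cancel' (dvd2 n)
  have h2b := Int.mul_ediv_cancel' (dvd2 (n + 1))
  have h6a := Int.mul_ediv_cancel' (dvd6 n)
  have h6b := Int.mul_ediv_cancel' (dvd6 (n + 1))
  have h30a := Int.mul_ediv_cancel' (dvd30 n)
  have h30b := Int.mul_ediv_cancel' (dvd30 (n + 1))
  rcases hk with h | h | h | h | h <;> subst h <;>
    simp only [prefixA, if_neg (by omega : ¬ n + 1 < 0), if_neg (by omega : ¬ n < 0),
      PySem.Int.floordiv_eq_ediv_of_pos (show (0:Int) < 2 by norm_num),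
      PySem.Int.floordiv_eq_ediv_of_pos (show (0:Int) < 6 by norm_num),
      PySem.Int.floordiv_eq_ediv_of_pos (show (0:Int) < 30 by norm_num)] <;>
    norm_num [show (2:Int).toNat = 2 from rfl, show (3:Int).toNat = 3 from rfl,
      show (4:Int).toNat = 4 from rfl]
  · refine mul_left_cancel₀ (show (2:Int) ≠ 0 by norm_num) ?_
    linear_combination h2b - h2a
  · refine mul_left_cancel₀ (show (6:Int) ≠ 0 by norm_num) ?_
    linear_combination h6b - h6a
  · refine mul_left_cancel₀ (show (4:Int) ≠ 0 by norm_num) ?_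
    linear_combination (2 * ((n + 1) * (n + 1 + 1) / 2) + (n + 1) * (n + 1 + 1)) * h2b
      - (2 * (n * (n + 1) / 2) + n * (n + 1)) * h2a
  · refine mul_left_cancel₀ (show (30:Int) ≠ 0 by norm_num) ?_
    linear_combination h30b - h30a

-- hockey-stick building blocks: choose columns as exact polynomials (scaled)
lemma chooseP2 (m : Nat) : 2 * ((Nat.choose (m + 1) 2 : Nat) : Int) = ((m : Int) + 1) * m := by
  induction m with
  | zero => decide
  | succ m ih =>
      have hp := Nat.choose_succ_succ (m + 1) 1
      have h1 : (m + 1).choose 1 = m + 1 := Nat.choose_one_right _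
      rw [h1] at hp
      rw [hp]
      push_cast
      linarith [ih]

lemma chooseP3 (m : Nat) : 6 * ((Nat.choose (m + 1) 3 : Nat) : Int) = ((m : Int) + 1) * m * (m - 1) := by
  induction m with
  | zero => decide
  | succ m ih =>
      have hp := Nat.choose_succ_succ (m + 1) 2
      rw [hp]
      push_cast
      push_cast at ih
      nlinarith [ih, chooseP2 m]

lemma chooseP4 (m : Nat) : 24 * ((Nat.choose (m + 1) 4 : Nat) : Int) = ((m : Int) + 1) * m * (m - 1) * (m - 2) := by
  induction m with
  | zero => decide
  | succ m ih =>
      have hp := Nat.choose_succ_succ (m + 1) 3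
      rw [hp]
      push_cast
      push_cast at ih
      nlinarith [ih, chooseP3 m]

-- the B-side difference table, computed once and for all (symbolically in c, d)
lemma diffs_eq (c d : Int) :
    diffTable ((PySem.List.pyRange 0 5 1).map (fun i =>
      (c * i + d) ^ 4 + 2 * (c * i + d) ^ 3 + 11 * (c * i + d) ^ 2 + 34 * (c * i + d) + 24)) =
    [d ^ 4 + 2 * d ^ 3 + 11 * d ^ 2 + 34 * d + 24,
     4 * c * d ^ 3 + 6 * c ^ 2 * d ^ 2 + 4 * c ^ 3 * d + c ^ 4 + 6 * c * d ^ 2 + 6 * c ^ 2 * d + 2 * c ^ 3 + 22 * c * d + 11 * c ^ 2 + 34 * c,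
     12 * c ^ 2 * d ^ 2 + 24 * c ^ 3 * d + 14 * c ^ 4 + 12 * c ^ 2 * d + 12 * c ^ 3 + 22 * c ^ 2,
     24 * c ^ 3 * d + 36 * c ^ 4 + 12 * c ^ 3,
     24 * c ^ 4] := by
  have hr : PySem.List.pyRange (0 : Int) 5 1 = [0, 1, 2, 3, 4] := by decide
  rw [hr]
  simp only [List.map, diffTable, List.zipWith]
  norm_num
  constructor
  · ring
  constructor
  · ring
  constructor
  · ring
  ring

-- B's T(n) gains exactly the polynomial value at n+1 when it grows by one step
lemma altT_step (c d : Int) (m : Nat) :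
    altT (diffTable ((PySem.List.pyRange 0 5 1).map (fun i =>
        (c * i + d) ^ 4 + 2 * (c * i + d) ^ 3 + 11 * (c * i + d) ^ 2 + 34 * (c * i + d) + 24)))
      ((m : Int) + 1) =
    altT (diffTable ((PySem.List.pyRange 0 5 1).map (fun i =>
        (c * i + d) ^ 4 + 2 * (c * i + d) ^ 3 + 11 * (c * i + d) ^ 2 + 34 * (c * i + d) + 24)))
      (m : Int) +
    ((c * ((m : Int) + 1) + d) ^ 4 + 2 * (c * ((m : Int) + 1) + d) ^ 3 +
      11 * (c * ((m : Int) + 1) + d) ^ 2 + 34 * (c * ((m : Int) + 1) + d) + 24) := by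
  rw [diffs_eq]
  have h1 : ((m : Int) + 1 + 1).toNat = m + 2 := by omega
  have h2 : ((m : Int) + 1).toNat = m + 1 := by omega
  simp only [altT, if_neg (by omega : ¬ ((m : Int) + 1) < 0), if_neg (by omega : ¬ (m : Int) < 0),
    h1, h2, PySem.List.enumerate, List.map, List.sum_cons, List.sum_nil]
  norm_num [show ((0:Int).toNat) = 0 from rfl, show ((1:Int).toNat) = 1 from rfl,
    show ((2:Int).toNat) = 2 from rfl, show ((3:Int).toNat) = 3 from rfl,
    show ((4:Int).toNat) = 4 from rfl]
  have q1 : (m + 1).choose 1 = m + 1 := Nat.choose_one_right _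
  have p2 : (m + 2).choose 2 = (m + 1).choose 1 + (m + 1).choose 2 := Nat.choose_succ_succ (m + 1) 1
  have p3 : (m + 2).choose 3 = (m + 1).choose 2 + (m + 1).choose 3 := Nat.choose_succ_succ (m + 1) 2
  have p4 : (m + 2).choose 4 = (m + 1).choose 3 + (m + 1).choose 4 := Nat.choose_succ_succ (m + 1) 3
  have p5 : (m + 2).choose 5 = (m + 1).choose 4 + (m + 1).choose 5 := Nat.choose_succ_succ (m + 1) 4
  rw [p2, p3, p4, p5, q1]
  push_cast
  linear_combination (6*c^2*d^2 + 12*c^3*d + 7*c^4 + 6*c^2*d + 6*c^3 + 11*c^2) * chooseP2 m +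
    (4*c^3*d + 6*c^4 + 2*c^3) * chooseP3 m + c^4 * chooseP4 m

-- the heart: A's expanded-coefficient combination of prefix power sums = B's Newton/hockey-stick T
lemma key (c d : Int) (n : Int) :
    (wkCoeff c d 4 0 + 2 * wkCoeff c d 3 0 + 11 * wkCoeff c d 2 0 + 34 * wkCoeff c d 1 0 + 24) * prefixA 0 n +
    (wkCoeff c d 4 1 + 2 * wkCoeff c d 3 1 + 11 * wkCoeff c d 2 1 + 34 * wkCoeff c d 1 1) * prefixA 1 n +
    (wkCoeff c d 4 2 + 2 * wkCoeff c d 3 2 + 11 * wkCoeff c d 2 2 + 34 * wkCoeff c d 1 2) * prefixA 2 n +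
    (wkCoeff c d 4 3 + 2 * wkCoeff c d 3 3 + 11 * wkCoeff c d 2 3 + 34 * wkCoeff c d 1 3) * prefixA 3 n +
    (wkCoeff c d 4 4 + 2 * wkCoeff c d 3 4 + 11 * wkCoeff c d 2 4 + 34 * wkCoeff c d 1 4) * prefixA 4 n
    = altT (diffTable ((PySem.List.pyRange 0 5 1).map (fun i =>
        (c * i + d) ^ 4 + 2 * (c * i + d) ^ 3 + 11 * (c * i + d) ^ 2 + 34 * (c * i + d) + 24))) n := by
  rcases lt_or_ge n 0 with hn | hn
  · simp [prefixA, altT, if_pos hn]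
  · obtain ⟨m, rfl⟩ : ∃ m : Nat, n = (m : Int) := ⟨n.toNat, by omega⟩
    induction m with
    | zero =>
        rw [diffs_eq]
        simp only [altT, if_neg (by omega : ¬ ((0:Nat) : Int) < 0), PySem.List.enumerate,
          List.map, List.sum_cons, List.sum_nil]
        simp [prefixA, wkCoeff, PySem.Int.floordiv]
    | succ m ih =>
        have hm : (0 : Int) ≤ (m : Int) := by positivity
        push_cast
        rw [prefix_step 0 m hm (by norm_num), prefix_step 1 m hm (by norm_num),
          prefix_step 2 m hm (by norm_num), prefix_step 3 m hm (by norm_num),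
          prefix_step 4 m hm (by norm_num), altT_step c d m]
        have ih' := ih hm
        simp only [wkCoeff] at ih' ⊢
        norm_num [show (2:Int).toNat = 2 from rfl, show (3:Int).toNat = 3 from rfl,
          show (4:Int).toNat = 4 from rfl, show Nat.choose 4 2 = 6 from rfl,
          show Nat.choose 4 3 = 4 from rfl, show Nat.choose 3 2 = 3 from rfl] at ih' ⊢
        linear_combination ih'

-- ===== VERDICT (by name: the statement is the Claim_ definition above) =====
theorem sum_P_linear_spec : Claim_equal_sum_P_linear := by
  intro v1 v2 c d _
  unfold Spec_sum_P_linear sum_P_linear sum_P_linear_alt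
  by_cases h : v1 > v2
  · simp [h]
  · simp only [if_neg h]
    congr 1
    have hr : PySem.List.pyRange (0:Int) 5 1 = [0, 1, 2, 3, 4] := by decide
    simp only [hr, List.foldl_cons, List.foldl_nil, sum_pow, if_neg h]
    simp only [show ((0:Int) == 0) = true by decide, show ((1:Int) == 0) = false by decide,
      show ((2:Int) == 0) = false by decide, show ((3:Int) == 0) = false by decide,
      show ((4:Int) == 0) = false by decide, Bool.false_eq_true, if_true, if_false]
    have k2 := key c d v2
    have k1 := key c d (v1 - 1)
    rw [hr] at k1 k2
    linear_combination k2 - k1
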